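-- pv_equiv track=rewrite | github.com/yzheng21/Leetcode | leetcode/presum/bomb enemy.py | maxkilled
-- ===== SOURCE A (Python) =====
-- def maxkilled(grid):
--     m,n = len(grid), 0
--     if m:
--         n = len(grid[0])
--     result, rows = 0, 0
--     cols = [0 for i in range(n)]
--     for i in range(m):
--         for j in range(n):
--             if j == 0 or grid[i][j - 1] == 'W':
--                 rows = 0
--                 for k in range(j, n):
--                     if grid[i][k] == 'W':
--                         break
--                     if grid[i][k] == 'E':
--                         rows += 1
--
--             if i == 0 or grid[i - 1][j] == 'W':
--                 cols[j] = 0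
--                 for k in range(i, m):
--                     if grid[k][j] == 'W':
--                         break
--                     if grid[k][j] == 'E':
--                         cols[j] += 1
--
--             if grid[i][j] == '0' and rows + cols[j] > result:
--                 result = rows + cols[j]
--
--     return result
-- ===== SOURCE B (Python) =====
-- def maxkilled(grid):
--     m = len(grid)
--     if m == 0:
--         return 0
--     n = len(grid[0])
--
--     def sweep(cells):
--         acc, out = 0, []
--         for c in cells:
--             acc = 0 if c == 'W' else acc + (1 if c == 'E' else 0)
--             out.append(acc)
--         return out
--
--     rows = [[grid[i][j] for j in range(n)] for i in range(m)]
--     left = [sweep(r) for r in rows]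
--     right = [sweep(r[::-1])[::-1] for r in rows]
--     cols = [[grid[i][j] for i in range(m)] for j in range(n)]
--     up = [sweep(c) for c in cols]
--     down = [sweep(c[::-1])[::-1] for c in cols]
--
--     best = 0
--     for i in range(m):
--         for j in range(n):
--             if grid[i][j] == '0':
--                 best = max(best, left[i][j] + right[i][j] + up[j][i] + down[j][i])
--     return best
-- ===== Notes on version B (the rewrite author's own statement) =====
-- stated objective: alternative
-- what changed: A maintains a cached running state (rows, cols[]) re-scanned lazily at each wall boundary inside one nested loop; B instead precomputes four directional sweep tables (left/right per row, up/down per column) and takes the max of left+right+up+down over '0' cells in a final pass.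
import Mathlib
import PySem

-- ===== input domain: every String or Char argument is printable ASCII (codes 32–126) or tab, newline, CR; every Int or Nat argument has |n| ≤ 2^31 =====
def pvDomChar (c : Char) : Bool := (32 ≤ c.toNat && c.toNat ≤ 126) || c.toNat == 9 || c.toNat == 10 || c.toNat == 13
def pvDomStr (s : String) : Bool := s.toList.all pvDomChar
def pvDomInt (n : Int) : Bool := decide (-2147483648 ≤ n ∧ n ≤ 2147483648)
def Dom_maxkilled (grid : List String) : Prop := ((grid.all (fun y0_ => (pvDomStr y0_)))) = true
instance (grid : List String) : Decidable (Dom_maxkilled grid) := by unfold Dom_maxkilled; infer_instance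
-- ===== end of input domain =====

-- B replaces A's cached re-scanning state machine by four precomputed directional
-- prefix tables (left/right/up/down sweeps) and a final max pass: an alternative
-- decomposition of the same O(m*n) computation.

-- ===== PORT A =====
-- A's inner `for k in range(j, n)` row scan with break
def scanA (row : List Char) : List Nat → Int → Int
  | [], acc => acc
  | k :: ks, acc =>
    if row.getD k ' ' = 'W' then acc
    else scanA row ks (acc + if row.getD k ' ' = 'E' then 1 else 0)

-- A's inner `for k in range(i, m)` column scan with break
def scanColA (g : List (List Char)) (j : Nat) : List Nat → Int → Int
  | [], acc => acc
  | k :: ks, acc =>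
    if (g.getD k []).getD j ' ' = 'W' then acc
    else scanColA g j ks (acc + if (g.getD k []).getD j ' ' = 'E' then 1 else 0)

-- the body of A's double loop, state = (result, rows, cols)
def stepA (g : List (List Char)) (m n i : Nat) (st : Int × Int × List Int) (j : Nat) :
    Int × Int × List Int :=
  let row := g.getD i []
  let rows := if j = 0 ∨ row.getD (j - 1) ' ' = 'W'
              then scanA row (List.range' j (n - j)) 0 else st.2.1
  let cols := if i = 0 ∨ (g.getD (i - 1) []).getD j ' ' = 'W'
              then st.2.2.set j (scanColA g j (List.range' i (m - i)) 0) else st.2.2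
  let result := if row.getD j ' ' = '0' ∧ rows + cols.getD j 0 > st.1
                then rows + cols.getD j 0 else st.1
  (result, rows, cols)

def maxkilled (grid : List String) : Int :=
  let m := grid.length
  let n := if m ≠ 0 then (grid.getD 0 "").toList.length else 0
  let g := grid.map String.toList
  ((List.range m).foldl (fun st i => (List.range n).foldl (stepA g m n i) st)
    (0, 0, (List.range n).map fun _ => (0 : Int))).1

-- ===== PORT B =====
-- B's `sweep`: running enemy count, reset at walls
def sweepB (acc : Int) : List Char → List Int
  | [] => []
  | c :: t =>
    let a := if c = 'W' then 0 else acc + if c = 'E' then 1 else 0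
    a :: sweepB a t

def maxkilled_alt (grid : List String) : Int :=
  if grid.length = 0 then 0
  else
    let m := grid.length
    let n := (grid.getD 0 "").toList.length
    let rows := grid.map (fun s => s.toList.take n)
    let left := rows.map (sweepB 0)
    let right := rows.map (fun r => (sweepB 0 r.reverse).reverse)
    let cols := (List.range n).map (fun j => grid.map (fun s => s.toList.getD j ' '))
    let up := cols.map (sweepB 0)
    let down := cols.map (fun c => (sweepB 0 c.reverse).reverse)
    (List.range m).foldl (fun best i =>
      (List.range n).foldl (fun best j =>
        if (rows.getD i []).getD j ' ' = '0' then
          max best ((left.getD i []).getD j 0 + (right.getD i []).getD j 0 +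
                    (up.getD j []).getD i 0 + (down.getD j []).getD i 0)
        else best) best) 0

-- ===== PRECONDITION & SPEC =====
-- Pre_ excludes exactly the ragged grids on which A raises IndexError: some row is
-- shorter than the first row (row 0 fixes the width n; A indexes every row up to n).
def Pre_maxkilled (grid : List String) : Prop :=
  ∀ s ∈ grid, (grid.headD "").toList.length ≤ s.toList.length

instance (grid : List String) : Decidable (Pre_maxkilled grid) := by
  unfold Pre_maxkilled; infer_instance

def pvWitness_maxkilled : List String := ["0E0", "WEW", "000"]

def Spec_maxkilled (grid : List String) (out : Int) : Prop := out = maxkilled_alt grid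
instance (grid : List String) (out : Int) : Decidable (Spec_maxkilled grid out) := by
  unfold Spec_maxkilled; infer_instance

-- ===== CLAIM (what is proved, stated in full; the proofs are below) =====
def Claim_equal_maxkilled : Prop :=
  ∀ (grid : List String), Dom_maxkilled grid → Pre_maxkilled grid →
    Spec_maxkilled grid (maxkilled grid)

-- ===== LEMMAS AND PROOFS =====

-- reference layer: per-cell values that both ports are reduced to
def valC (c : Char) : Int := if c = 'E' then 1 else 0

def scanE : List Char → Int
  | [] => 0
  | c :: t => if c = 'W' then 0 else valC c + scanE t

def stepv (a : Int) (c : Char) : Int := if c = 'W' then 0 else a + valC c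

def Lf (r : List Char) : Nat → Int
  | 0 => stepv 0 (r.getD 0 ' ')
  | j + 1 => stepv (Lf r j) (r.getD (j + 1) ' ')

def Frow (r : List Char) : Nat → Int
  | 0 => scanE r
  | j + 1 => if r.getD j ' ' = 'W' then scanE (r.drop (j + 1)) else Frow r j

def Rw (grid : List String) (n i : Nat) : List Char := (grid.getD i "").toList.take n

def Cl (grid : List String) (j : Nat) : List Char := grid.map (fun s => s.toList.getD j ' ')

def cellv (grid : List String) (n i j : Nat) : Int :=
  Frow (Rw grid n i) j + Frow (Cl grid j) i

def fA (grid : List String) (n i : Nat) (res : Int) (j : Nat) : Int :=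
  if (Rw grid n i).getD j ' ' = '0' ∧ cellv grid n i j > res then cellv grid n i j else res

lemma scanA_eq (row : List Char) :
    ∀ (cnt j : Nat) (acc : Int), j + cnt ≤ row.length →
      scanA row (List.range' j cnt) acc = acc + scanE ((row.drop j).take cnt) := by
  intro cnt
  induction cnt with
  | zero => intro j acc h; simp [scanA, scanE]
  | succ c ih =>
    intro j acc h
    have hj : j < row.length := by omega
    rw [List.range'_succ]
    have hd : row.drop j = row[j] :: row.drop (j + 1) := List.drop_eq_getElem_cons hj
    have hgd : row.getD j ' ' = row[j] := List.getD_eq_getElem row ' ' hj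
    simp only [scanA, hgd, hd, List.take_succ_cons, scanE]
    by_cases hw : row[j] = 'W'
    · simp [hw]
    · simp only [hw, ite_false]
      rw [ih (j + 1) _ (by omega)]
      unfold valC
      split_ifs <;> ring

lemma scanColA_eq_scanA (g : List (List Char)) (j : Nat) :
    ∀ (ks : List Nat) (acc : Int),
      scanColA g j ks acc = scanA (g.map (fun r => r.getD j ' ')) ks acc := by
  have hget : ∀ k : Nat, (g.map (fun r => r.getD j ' ')).getD k ' ' = (g.getD k []).getD j ' ' := by
    intro k
    by_cases hk : k < g.length
    · rw [List.getD_eq_getElem _ _ (by simpa using hk), List.getD_eq_getElem _ _ hk,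
        List.getElem_map]
    · rw [List.getD_eq_default _ _ (by simpa using not_lt.mp hk),
        List.getD_eq_default _ _ (not_lt.mp hk)]
      simp
  intro ks
  induction ks with
  | nil => intro acc; simp [scanColA, scanA]
  | cons k ks ih => intro acc; simp only [scanColA, scanA, hget]; split_ifs <;> simp [ih]

lemma sweep_length (l : List Char) : ∀ (a : Int), (sweepB a l).length = l.length := by
  induction l with
  | nil => intro a; simp [sweepB]
  | cons c t ih => intro a; simp [sweepB, ih]

lemma sweep_getD (l : List Char) : ∀ (a : Int) (j : Nat), j < l.length →
    (sweepB a l).getD j 0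
      = stepv (if j = 0 then a else (sweepB a l).getD (j - 1) 0) (l.getD j ' ') := by
  induction l with
  | nil => intro a j h; simp at h
  | cons c t ih =>
    intro a j h
    cases j with
    | zero => simp [sweepB, stepv, valC]
    | succ j =>
      have hj : j < t.length := by simpa using h
      simp only [sweepB, List.getD_cons_succ]
      rw [ih _ j hj]
      cases j with
      | zero => simp [stepv, valC]
      | succ j' => simp [stepv, valC]

lemma sweep0_getD_Lf (r : List Char) (j : Nat) (h : j < r.length) :
    (sweepB 0 r).getD j 0 = Lf r j := by
  induction j with
  | zero => rw [sweep_getD r 0 0 h]; simp [Lf]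
  | succ j ih =>
    rw [sweep_getD r 0 (j + 1) h]
    simp only [Nat.succ_ne_zero, ite_false, Nat.add_sub_cancel]
    rw [ih (by omega)]
    rfl

lemma Lf_eq_scanE_rev (r : List Char) (j : Nat) (h : j < r.length) :
    Lf r j = scanE ((r.take (j + 1)).reverse) := by
  induction j with
  | zero =>
    cases r with
    | nil => simp at h
    | cons c t => simp [Lf, stepv, scanE, valC]
  | succ j ih =>
    have hj : j < r.length := by omega
    have h1 : r.take (j + 2) = r.take (j + 1) ++ [r[j + 1]] := by
      rw [List.take_add_one, List.getElem?_eq_getElem h]; rfl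
    rw [Lf, ih hj, h1, List.reverse_append]
    simp only [List.reverse_singleton, List.singleton_append, scanE, stepv,
      List.getD_eq_getElem r ' ' h]
    split_ifs <;> ring

lemma right_getD (r : List Char) (j : Nat) (h : j < r.length) :
    ((sweepB 0 r.reverse).reverse).getD j 0 = scanE (r.drop j) := by
  have hlen : (sweepB 0 r.reverse).length = r.length := by
    rw [sweep_length]; exact List.length_reverse
  have h1 : ((sweepB 0 r.reverse).reverse).getD j 0 = (sweepB 0 r.reverse).getD (r.length - 1 - j) 0 := by
    rw [List.getD_eq_getElem _ _ (by simp [hlen, h]),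
      List.getD_eq_getElem _ _ (by omega : r.length - 1 - j < (sweepB 0 r.reverse).length)]
    rw [List.getElem_reverse]
    congr 1
    omega
  rw [h1, sweep0_getD_Lf _ _ (by simp; omega),
    Lf_eq_scanE_rev _ _ (by simp; omega)]
  have h2 : r.length - 1 - j + 1 = r.length - j := by omega
  rw [h2, List.take_reverse]
  have h3 : r.length - (r.length - j) = j := by omega
  rw [h3, List.reverse_reverse]

lemma scanE_drop_cons (r : List Char) (j : Nat) (h : j < r.length) :
    scanE (r.drop j)
      = if r.getD j ' ' = 'W' then 0 else valC (r.getD j ' ') + scanE (r.drop (j + 1)) := by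
  rw [List.drop_eq_getElem_cons h, List.getD_eq_getElem r ' ' h]
  rfl

lemma Lf_W (r : List Char) (j : Nat) (h : r.getD j ' ' = 'W') : Lf r j = 0 := by
  cases j with
  | zero => show stepv 0 (r.getD 0 ' ') = 0; rw [h]; simp [stepv]
  | succ j => show stepv (Lf r j) (r.getD (j + 1) ' ') = 0; rw [h]; simp [stepv]

lemma KL (r : List Char) : ∀ (j : Nat), j < r.length → r.getD j ' ' ≠ 'W' →
    Frow r j = Lf r j + scanE (r.drop (j + 1)) := by
  intro j
  induction j with
  | zero =>
    intro h hw
    have hw' : r[0]?.getD ' ' ≠ 'W' := by rwa [List.getD_eq_getElem?_getD] at hw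
    have h0 : scanE (r.drop 0) = scanE r := by simp
    rw [Frow, ← h0, scanE_drop_cons r 0 h, Lf]
    simp [stepv, hw', List.getD_eq_getElem?_getD]
  | succ j ih =>
    intro h hw
    have hj : j < r.length := by omega
    by_cases hwj : r.getD j ' ' = 'W'
    · rw [Frow, if_pos hwj, scanE_drop_cons r (j+1) h, if_neg hw, Lf, stepv, if_neg hw,
        Lf_W r j hwj]
      ring
    · rw [Frow, if_neg hwj, ih hj hwj, scanE_drop_cons r (j+1) h, if_neg hw, Lf, stepv,
        if_neg hw]
      ring


lemma gmap_getD (grid : List String) (i : Nat) (hi : i < grid.length) :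
    (grid.map String.toList).getD i [] = (grid.getD i "").toList := by
  rw [List.getD_eq_getElem _ _ (by simpa using hi), List.getD_eq_getElem _ _ hi,
    List.getElem_map]

lemma Cl_length (grid : List String) (j : Nat) : (Cl grid j).length = grid.length := by
  simp [Cl]

lemma Cl_getD (grid : List String) (j k : Nat) (hk : k < grid.length) :
    (Cl grid j).getD k ' ' = (grid.getD k "").toList.getD j ' ' := by
  unfold Cl
  rw [List.getD_eq_getElem _ _ (by simpa using hk), List.getD_eq_getElem _ _ hk,
    List.getElem_map]

lemma Rw_length (grid : List String) (n i : Nat)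
    (hni : n ≤ (grid.getD i "").toList.length) : (Rw grid n i).length = n := by
  unfold Rw
  rw [List.length_take]
  omega

lemma Rw_getD (grid : List String) (n i j : Nat) (hj : j < n)
    (_hni : n ≤ (grid.getD i "").toList.length) :
    (Rw grid n i).getD j ' ' = (grid.getD i "").toList.getD j ' ' := by
  unfold Rw
  rw [List.getD_eq_getElem?_getD, List.getD_eq_getElem?_getD, List.getElem?_take,
    if_pos hj]
  rfl

lemma scanA_row (grid : List String) (n i j : Nat)
    (hni : n ≤ (grid.getD i "").toList.length) (hj : j ≤ n) :
    scanA (grid.getD i "").toList (List.range' j (n - j)) 0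
      = scanE ((Rw grid n i).drop j) := by
  rw [scanA_eq _ (n - j) j 0 (by omega), zero_add]
  unfold Rw
  rw [List.drop_take]

lemma scanColA_col (grid : List String) (j i : Nat) (hi : i ≤ grid.length) :
    scanColA (grid.map String.toList) j (List.range' i (grid.length - i)) 0
      = scanE ((Cl grid j).drop i) := by
  rw [scanColA_eq_scanA]
  have hmap : (grid.map String.toList).map (fun r => r.getD j ' ') = Cl grid j := by
    rw [List.map_map]; rfl
  rw [hmap, scanA_eq _ (grid.length - i) i 0 (by rw [Cl_length]; omega), zero_add]
  congr 1
  apply List.take_of_length_le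
  rw [List.length_drop, Cl_length]

lemma getD_set_int (cols : List Int) (j k : Nat) (x : Int) (hk : k < cols.length) :
    (cols.set j x).getD k 0 = if j = k then x else cols.getD k 0 := by
  rw [List.getD_eq_getElem _ _ (by simpa using hk), List.getD_eq_getElem _ _ hk,
    List.getElem_set]

lemma colj_after (grid : List String) (n i j : Nat) (cols : List Int)
    (him : i < grid.length) (hj : j < n) (hlen : cols.length = n)
    (hcolj : cols.getD j 0 = if i = 0 then 0 else Frow (Cl grid j) (i - 1)) :
    (if i = 0 ∨ (Cl grid j).getD (i - 1) ' ' = 'W'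
     then cols.set j (scanE ((Cl grid j).drop i)) else cols).getD j 0
      = Frow (Cl grid j) i := by
  by_cases hc : i = 0 ∨ (Cl grid j).getD (i - 1) ' ' = 'W'
  · rw [if_pos hc, getD_set_int cols j j _ (by omega), if_pos rfl]
    cases i with
    | zero => simp [Frow]
    | succ i' =>
      have hw : (Cl grid j).getD i' ' ' = 'W' := by
        rcases hc with h0 | hw
        · exact absurd h0 (Nat.succ_ne_zero i')
        · simpa using hw
      rw [Frow, if_pos hw]
  · rw [if_neg hc]
    obtain ⟨hi0, hw⟩ := not_or.mp hc
    cases i with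
    | zero => exact absurd rfl hi0
    | succ i' =>
      rw [hcolj, if_neg hi0, Frow, if_neg (by simpa using hw)]
      simp

lemma stepA_char (grid : List String) (n i j : Nat) (res rows0 : Int) (cols : List Int)
    (hnd : ∀ i', i' < grid.length → n ≤ (grid.getD i' "").toList.length)
    (him : i < grid.length) (hj : j < n) (hlen : cols.length = n)
    (hrows : j ≠ 0 → rows0 = Frow (Rw grid n i) (j - 1))
    (hcolj : cols.getD j 0 = if i = 0 then 0 else Frow (Cl grid j) (i - 1)) :
    stepA (grid.map String.toList) grid.length n i (res, rows0, cols) j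
      = (fA grid n i res j, Frow (Rw grid n i) j,
         if i = 0 ∨ (Cl grid j).getD (i - 1) ' ' = 'W'
         then cols.set j (scanE ((Cl grid j).drop i)) else cols) := by
  have hni : n ≤ (grid.getD i "").toList.length := hnd i him
  have hrow : (grid.map String.toList).getD i [] = (grid.getD i "").toList :=
    gmap_getD grid i him
  -- the rows accumulator after the step
  have hrows1 : (if j = 0 ∨ ((grid.map String.toList).getD i []).getD (j - 1) ' ' = 'W'
      then scanA ((grid.map String.toList).getD i []) (List.range' j (n - j)) 0 else rows0)
      = Frow (Rw grid n i) j := by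
    rw [hrow]
    cases j with
    | zero =>
      rw [if_pos (Or.inl rfl), scanA_row grid n i 0 hni (by omega)]
      simp [Frow]
    | succ j' =>
      have hj' : j' < n := by omega
      have hcond : (grid.getD i "").toList.getD (j' + 1 - 1) ' '
          = (Rw grid n i).getD j' ' ' := by
        rw [Nat.add_sub_cancel, Rw_getD grid n i j' hj' hni]
      rw [hcond]
      by_cases hw : (Rw grid n i).getD j' ' ' = 'W'
      · rw [if_pos (Or.inr hw), scanA_row grid n i (j' + 1) hni (by omega), Frow,
          if_pos hw]
      · rw [if_neg (not_or.mpr ⟨Nat.succ_ne_zero j', hw⟩),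
          hrows (Nat.succ_ne_zero j'), Frow, if_neg hw, Nat.add_sub_cancel]
  -- the cols array after the step
  have hcols1 : (if i = 0 ∨ ((grid.map String.toList).getD (i - 1) []).getD j ' ' = 'W'
      then cols.set j (scanColA (grid.map String.toList) j
        (List.range' i (grid.length - i)) 0) else cols)
      = (if i = 0 ∨ (Cl grid j).getD (i - 1) ' ' = 'W'
         then cols.set j (scanE ((Cl grid j).drop i)) else cols) := by
    have hcol : scanColA (grid.map String.toList) j (List.range' i (grid.length - i)) 0
        = scanE ((Cl grid j).drop i) := scanColA_col grid j i (le_of_lt him)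
    rcases Nat.eq_zero_or_pos i with h0 | hpos
    · rw [if_pos (Or.inl h0), if_pos (Or.inl h0), hcol]
    · have hi1 : i - 1 < grid.length := by omega
      have hcnd : ((grid.map String.toList).getD (i - 1) []).getD j ' '
          = (Cl grid j).getD (i - 1) ' ' := by
        rw [gmap_getD grid (i - 1) hi1, Cl_getD grid j (i - 1) hi1]
      rw [hcnd, hcol]
  show (_, _, _) = _
  rw [hrows1, hcols1]
  have hcellcol : (if i = 0 ∨ (Cl grid j).getD (i - 1) ' ' = 'W'
      then cols.set j (scanE ((Cl grid j).drop i)) else cols).getD j 0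
      = Frow (Cl grid j) i := colj_after grid n i j cols him hj hlen hcolj
  rw [hcellcol, hrow, ← Rw_getD grid n i j hj hni]
  rfl

lemma innerA (grid : List String) (n i : Nat)
    (hnd : ∀ i', i' < grid.length → n ≤ (grid.getD i' "").toList.length)
    (him : i < grid.length) :
    ∀ (cnt j : Nat) (res rows0 : Int) (cols : List Int),
      j + cnt = n → cols.length = n →
      (j ≠ 0 → rows0 = Frow (Rw grid n i) (j - 1)) →
      (∀ k, k < n → cols.getD k 0 =
         if k < j then Frow (Cl grid k) i
         else if i = 0 then 0 else Frow (Cl grid k) (i - 1)) →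
      (((List.range' j cnt).foldl (stepA (grid.map String.toList) grid.length n i)
          (res, rows0, cols)).1 = (List.range' j cnt).foldl (fA grid n i) res)
      ∧ (((List.range' j cnt).foldl (stepA (grid.map String.toList) grid.length n i)
          (res, rows0, cols)).2.2.length = n)
      ∧ (∀ k, k < n → ((List.range' j cnt).foldl (stepA (grid.map String.toList)
          grid.length n i) (res, rows0, cols)).2.2.getD k 0 = Frow (Cl grid k) i) := by
  intro cnt
  induction cnt with
  | zero =>
    intro j res rows0 cols hjn hlen hrows hcols
    refine ⟨rfl, hlen, ?_⟩
    intro k hk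
    have h := hcols k hk
    rw [if_pos (by omega)] at h
    exact h
  | succ c ih =>
    intro j res rows0 cols hjn hlen hrows hcols
    have hj : j < n := by omega
    have hcolj : cols.getD j 0 = if i = 0 then 0 else Frow (Cl grid j) (i - 1) := by
      have h := hcols j hj
      rwa [if_neg (by omega)] at h
    rw [List.range'_succ, List.foldl_cons, List.foldl_cons,
      stepA_char grid n i j res rows0 cols hnd him hj hlen hrows hcolj]
    set cols' := if i = 0 ∨ (Cl grid j).getD (i - 1) ' ' = 'W'
        then cols.set j (scanE ((Cl grid j).drop i)) else cols with hcols'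
    have hlen' : cols'.length = n := by
      rw [hcols']; split_ifs <;> simp [hlen]
    have hget' : ∀ k, k < n → cols'.getD k 0 =
        if k < j + 1 then Frow (Cl grid k) i
        else if i = 0 then 0 else Frow (Cl grid k) (i - 1) := by
      intro k hk
      by_cases hkj : k = j
      · rw [hkj, if_pos (Nat.lt_succ_self j), hcols']
        exact colj_after grid n i j cols him hj hlen hcolj
      · have hunch : cols'.getD k 0 = cols.getD k 0 := by
          rw [hcols']
          split_ifs with hc
          · rw [getD_set_int cols j k _ (by omega), if_neg (fun h => hkj h.symm)]
          · rfl
        rw [hunch, hcols k hk]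
        by_cases hklt : k < j
        · rw [if_pos hklt]
          rw [if_pos (by omega : k < j + 1)]
        · rw [if_neg hklt]
          rw [if_neg (by omega : ¬ k < j + 1)]
    exact ih (j + 1) (fA grid n i res j) (Frow (Rw grid n i) j) cols' (by omega) hlen'
      (fun _ => by rw [Nat.add_sub_cancel]) hget'

lemma outerA (grid : List String) (n : Nat)
    (hnd : ∀ i', i' < grid.length → n ≤ (grid.getD i' "").toList.length) :
    ∀ (cnt i : Nat) (res rows0 : Int) (cols : List Int),
      i + cnt = grid.length → cols.length = n →
      (∀ k, k < n → cols.getD k 0 = if i = 0 then 0 else Frow (Cl grid k) (i - 1)) →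
      ((List.range' i cnt).foldl
          (fun st i' => (List.range n).foldl (stepA (grid.map String.toList)
            grid.length n i') st) (res, rows0, cols)).1
        = (List.range' i cnt).foldl
            (fun r i' => (List.range n).foldl (fA grid n i') r) res := by
  intro cnt
  induction cnt with
  | zero => intro i res rows0 cols _ _ _; rfl
  | succ c ih =>
    intro i res rows0 cols hi hlen hcols
    have him : i < grid.length := by omega
    rw [List.range'_succ, List.foldl_cons, List.foldl_cons, List.range_eq_range']
    obtain ⟨h1, h2, h3⟩ := innerA grid n i hnd him n 0 res rows0 cols (by omega) hlen
      (fun h => absurd rfl h)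
      (by intro k hk; rw [if_neg (by omega)]; exact hcols k hk)
    have hih := ih (i + 1)
      ((List.range' 0 n).foldl (stepA (grid.map String.toList) grid.length n i)
        (res, rows0, cols)).1
      ((List.range' 0 n).foldl (stepA (grid.map String.toList) grid.length n i)
        (res, rows0, cols)).2.1
      ((List.range' 0 n).foldl (stepA (grid.map String.toList) grid.length n i)
        (res, rows0, cols)).2.2
      (by omega) h2 (by intro k hk; rw [h3 k hk, if_neg (Nat.succ_ne_zero i),
        Nat.add_sub_cancel])
    rw [h1] at hih
    rw [List.range_eq_range'] at hih
    have heta : ((List.foldl (stepA (List.map String.toList grid) grid.length n i)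
          (res, rows0, cols) (List.range' 0 n)).1,
        (List.foldl (stepA (List.map String.toList grid) grid.length n i)
          (res, rows0, cols) (List.range' 0 n)).2.1,
        (List.foldl (stepA (List.map String.toList grid) grid.length n i)
          (res, rows0, cols) (List.range' 0 n)).2.2)
        = List.foldl (stepA (List.map String.toList grid) grid.length n i)
          (res, rows0, cols) (List.range' 0 n) := rfl
    rw [h1] at heta
    rw [heta] at hih
    exact hih

lemma pre_nd (grid : List String) (hpre : Pre_maxkilled grid) :
    ∀ i, i < grid.length →
      (grid.getD 0 "").toList.length ≤ (grid.getD i "").toList.length := by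
  intro i hi
  have hmem : grid.getD i "" ∈ grid := by
    rw [List.getD_eq_getElem _ _ hi]; exact List.getElem_mem hi
  have h := hpre _ hmem
  have hh : grid.headD "" = grid.getD 0 "" := by cases grid <;> rfl
  rwa [hh] at h

lemma A_to_fold (grid : List String) (hg : grid ≠ [])
    (hnd : ∀ i', i' < grid.length →
      (grid.getD 0 "").toList.length ≤ (grid.getD i' "").toList.length) :
    maxkilled grid = (List.range grid.length).foldl
      (fun r i => (List.range (grid.getD 0 "").toList.length).foldl
        (fA grid (grid.getD 0 "").toList.length i) r) 0 := by
  have hne : grid.length ≠ 0 := by simpa using hg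
  unfold maxkilled
  dsimp only
  rw [if_pos hne, List.range_eq_range' (n := grid.length)]
  exact outerA grid (grid.getD 0 "").toList.length hnd grid.length 0 0 0 _ (by omega)
    (by simp)
    (by intro k hk
        rw [if_pos rfl, List.getD_eq_getElem _ _ (by simpa using hk)]
        simp)

lemma foldl_congr_nat (l : List Nat) :
    ∀ (f g : Int → Nat → Int), (∀ j ∈ l, ∀ r, f r j = g r j) →
      ∀ res, l.foldl f res = l.foldl g res := by
  induction l with
  | nil => intro f g _ res; rfl
  | cons a t ih =>
    intro f g h res
    rw [List.foldl_cons, List.foldl_cons, h a (List.mem_cons_self) res]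
    exact ih f g (fun j hj r => h j (List.mem_cons_of_mem a hj) r) _

lemma B_to_fold (grid : List String) (hg : grid ≠ [])
    (hnd : ∀ i', i' < grid.length →
      (grid.getD 0 "").toList.length ≤ (grid.getD i' "").toList.length) :
    maxkilled_alt grid = (List.range grid.length).foldl
      (fun r i => (List.range (grid.getD 0 "").toList.length).foldl
        (fA grid (grid.getD 0 "").toList.length i) r) 0 := by
  have hne : ¬ grid.length = 0 := by simpa using hg
  set n := (grid.getD 0 "").toList.length with hn
  unfold maxkilled_alt
  rw [if_neg hne]
  dsimp only
  rw [← hn]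
  apply foldl_congr_nat
  intro i hi r
  apply foldl_congr_nat
  intro j hj r
  have him : i < grid.length := List.mem_range.mp hi
  have hjn : j < n := List.mem_range.mp hj
  have hni : n ≤ (grid.getD i "").toList.length := hnd i him
  have hRlen : (Rw grid n i).length = n := Rw_length grid n i hni
  have hClen : (Cl grid j).length = grid.length := Cl_length grid j
  -- the table rows
  have hrowsi : (grid.map fun s => s.toList.take n).getD i [] = Rw grid n i := by
    rw [List.getD_eq_getElem _ _ (by simpa using him), List.getElem_map]
    unfold Rw
    rw [List.getD_eq_getElem _ _ him]
  have hlefti : ((grid.map fun s => s.toList.take n).map (sweepB 0)).getD i []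
      = sweepB 0 (Rw grid n i) := by
    rw [List.getD_eq_getElem _ _ (by simpa using him), List.getElem_map, ← hrowsi,
      List.getD_eq_getElem _ _ (by simpa using him)]
  have hrighti : ((grid.map fun s => s.toList.take n).map
        (fun r => (sweepB 0 r.reverse).reverse)).getD i []
      = (sweepB 0 (Rw grid n i).reverse).reverse := by
    rw [List.getD_eq_getElem _ _ (by simpa using him), List.getElem_map, ← hrowsi,
      List.getD_eq_getElem _ _ (by simpa using him)]
  have hcolj : ((List.range n).map (fun j => grid.map (fun s => s.toList.getD j ' '))).getD j []
      = Cl grid j := by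
    rw [List.getD_eq_getElem _ _ (by simpa using hjn), List.getElem_map,
      List.getElem_range]
    rfl
  have hupj : (((List.range n).map (fun j => grid.map (fun s => s.toList.getD j ' '))).map
        (sweepB 0)).getD j [] = sweepB 0 (Cl grid j) := by
    rw [List.getD_eq_getElem _ _ (by simpa using hjn), List.getElem_map, ← hcolj,
      List.getD_eq_getElem _ _ (by simpa using hjn)]
  have hdownj : (((List.range n).map (fun j => grid.map (fun s => s.toList.getD j ' '))).map
        (fun c => (sweepB 0 c.reverse).reverse)).getD j []
      = (sweepB 0 (Cl grid j).reverse).reverse := by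
    rw [List.getD_eq_getElem _ _ (by simpa using hjn), List.getElem_map, ← hcolj,
      List.getD_eq_getElem _ _ (by simpa using hjn)]
  rw [hrowsi, hlefti, hrighti, hupj, hdownj]
  by_cases hcell : (Rw grid n i).getD j ' ' = '0'
  · rw [if_pos hcell]
    have hnW : (Rw grid n i).getD j ' ' ≠ 'W' := by rw [hcell]; decide
    have hcoh : (Cl grid j).getD i ' ' = (Rw grid n i).getD j ' ' := by
      rw [Cl_getD grid j i him, Rw_getD grid n i j hjn hni]
    have hcnW : (Cl grid j).getD i ' ' ≠ 'W' := by rw [hcoh]; exact hnW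
    have hrsum : (sweepB 0 (Rw grid n i)).getD j 0
          + ((sweepB 0 (Rw grid n i).reverse).reverse).getD j 0
        = Frow (Rw grid n i) j := by
      rw [sweep0_getD_Lf _ _ (by omega), right_getD _ _ (by omega),
        scanE_drop_cons _ _ (by omega), if_neg hnW,
        KL (Rw grid n i) j (by omega) hnW, hcell]
      simp [valC]
    have hcsum : (sweepB 0 (Cl grid j)).getD i 0
          + ((sweepB 0 (Cl grid j).reverse).reverse).getD i 0
        = Frow (Cl grid j) i := by
      rw [sweep0_getD_Lf _ _ (by omega), right_getD _ _ (by omega),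
        scanE_drop_cons _ _ (by omega), if_neg hcnW,
        KL (Cl grid j) i (by omega) hcnW, hcoh, hcell]
      simp [valC]
    have hsum : (sweepB 0 (Rw grid n i)).getD j 0
          + ((sweepB 0 (Rw grid n i).reverse).reverse).getD j 0
          + (sweepB 0 (Cl grid j)).getD i 0
          + ((sweepB 0 (Cl grid j).reverse).reverse).getD i 0
        = cellv grid n i j := by
      unfold cellv
      rw [← hrsum, ← hcsum]
      ring
    rw [hsum]
    unfold fA
    by_cases hgt : cellv grid n i j > r
    · rw [if_pos ⟨hcell, hgt⟩]
      exact max_eq_right (by omega)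
    · rw [if_neg (fun h => hgt h.2)]
      exact max_eq_left (by omega)
  · rw [if_neg hcell]
    unfold fA
    rw [if_neg (fun h => hcell h.1)]

-- ===== VERDICT (by name: the statement is the Claim_ definition above) =====
theorem maxkilled_spec : Claim_equal_maxkilled := by
  intro grid _ hpre
  unfold Spec_maxkilled
  by_cases hg : grid = []
  · subst hg; rfl
  · rw [A_to_fold grid hg (pre_nd grid hpre), B_to_fold grid hg (pre_nd grid hpre)]
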